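-- pv_equiv track=rewrite | github.com/kamran-11003/AutoTest | execution/test_subtype_classifier.py | _has_cross_field_dependencies
-- ===== SOURCE A (Python) =====
-- from typing import Dict, List, Optional, Tuple
--
-- def _has_cross_field_dependencies(fields: List[Dict]) -> bool:
--     """Check if form has dependent fields"""
--     field_names = {f.get("name", "").lower() for f in fields}
--
--     # Look for confirm/match/verify pairs
--     patterns = [
--         ("password", "confirm"),
--         ("email", "confirm"),
--         ("password", "verify"),
--     ]
--
--     for field1, field2 in patterns:
--         if any(field1 in n for n in field_names) and any(field2 in n for n in field_names):
--             return True
--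
--     return False
-- ===== SOURCE B (Python) =====
-- def _has_cross_field_dependencies(fields):
--     """Check if form has dependent fields"""
--     has_password = has_confirm = has_email = has_verify = False
--     for f in fields:
--         n = f.get("name", "").lower()
--         if "password" in n:
--             has_password = True
--         if "confirm" in n:
--             has_confirm = True
--         if "email" in n:
--             has_email = True
--         if "verify" in n:
--             has_verify = True
--     return (has_password and has_confirm) or (has_email and has_confirm) or (has_password and has_verify)
-- ===== Notes on version B (the rewrite author's own statement) =====
-- stated objective: simpler
-- what changed: Replaces the set comprehension plus per-pattern any() rescans with a single pass over the fields that accumulates four boolean presence flags, combined once at the end.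
import Mathlib
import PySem

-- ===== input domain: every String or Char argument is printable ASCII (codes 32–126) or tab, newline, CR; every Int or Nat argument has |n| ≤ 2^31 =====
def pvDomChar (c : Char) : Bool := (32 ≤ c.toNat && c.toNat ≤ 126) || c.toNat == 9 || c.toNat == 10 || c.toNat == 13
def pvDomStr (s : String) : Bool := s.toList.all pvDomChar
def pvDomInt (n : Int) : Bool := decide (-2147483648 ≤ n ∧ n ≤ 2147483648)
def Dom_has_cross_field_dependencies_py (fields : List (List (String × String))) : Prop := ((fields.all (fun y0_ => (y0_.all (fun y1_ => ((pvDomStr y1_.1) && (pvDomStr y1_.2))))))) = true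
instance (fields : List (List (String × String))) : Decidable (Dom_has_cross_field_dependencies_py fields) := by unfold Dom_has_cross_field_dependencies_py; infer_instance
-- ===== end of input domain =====

-- B replaces the set comprehension and per-pattern any() rescans by one pass accumulating four presence flags; objective: simpler.

-- ===== PORT A =====
def has_cross_field_dependencies_py (fields : List (List (String × String))) : Bool :=
  let field_names : PySem.Set String :=
    PySem.Set.ofList (fields.map (fun f => PySem.Str.lower ((PySem.Dict.mk f).getD "name" "")))
  let patterns : List (String × String) :=
    [("password", "confirm"), ("email", "confirm"), ("password", "verify")]
  -- 'for … in patterns: if …: return True / return False' = any over patterns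
  patterns.any (fun p =>
    field_names.any (fun n => PySem.Str.isIn p.1 n) &&
    field_names.any (fun n => PySem.Str.isIn p.2 n))

-- ===== PORT B =====
def pvFlagsStep (acc : Bool × Bool × Bool × Bool) (f : List (String × String)) :
    Bool × Bool × Bool × Bool :=
  let n := PySem.Str.lower ((PySem.Dict.mk f).getD "name" "")
  ((if PySem.Str.isIn "password" n then true else acc.1),
   (if PySem.Str.isIn "confirm" n then true else acc.2.1),
   (if PySem.Str.isIn "email" n then true else acc.2.2.1),
   (if PySem.Str.isIn "verify" n then true else acc.2.2.2))

def has_cross_field_dependencies_py_alt (fields : List (List (String × String))) : Bool :=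
  let r := fields.foldl pvFlagsStep (false, false, false, false)
  (r.1 && r.2.1) || (r.2.2.1 && r.2.1) || (r.1 && r.2.2.2)

-- ===== PRECONDITION & SPEC =====
def Spec_has_cross_field_dependencies_py (fields : List (List (String × String))) (out : Bool) : Prop := out = has_cross_field_dependencies_py_alt fields
instance (fields : List (List (String × String))) (out : Bool) : Decidable (Spec_has_cross_field_dependencies_py fields out) := by unfold Spec_has_cross_field_dependencies_py; infer_instance

-- ===== CLAIM (what is proved, stated in full; the proofs are below) =====
def Claim_equal_has_cross_field_dependencies_py : Prop := ∀ (fields : List (List (String × String))), Dom_has_cross_field_dependencies_py fields → Spec_has_cross_field_dependencies_py fields (has_cross_field_dependencies_py fields)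

-- ===== LEMMAS AND PROOFS =====

-- any over set(xs) = any over xs (same elements)
theorem pv_set_any (xs : List String) (q : String → Bool) :
    (PySem.Set.ofList xs).any q = xs.any q := by
  rcases h : xs.any q with _ | _
  · rw [List.any_eq_false] at h ⊢
    intro x hx
    exact h x ((PySem.Set.mem_ofList _ _).mp hx)
  · rw [List.any_eq_true] at h ⊢
    obtain ⟨x, hx, hq⟩ := h
    exact ⟨x, (PySem.Set.mem_ofList _ _).mpr hx, hq⟩

-- the flag fold computes the four 'some name contains the substring' facts
theorem pv_flags_fold (fields : List (List (String × String))) (a b c d : Bool) :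
    fields.foldl pvFlagsStep (a, b, c, d) =
      (a || fields.any (fun f => PySem.Str.isIn "password" (PySem.Str.lower ((PySem.Dict.mk f).getD "name" ""))),
       b || fields.any (fun f => PySem.Str.isIn "confirm" (PySem.Str.lower ((PySem.Dict.mk f).getD "name" ""))),
       c || fields.any (fun f => PySem.Str.isIn "email" (PySem.Str.lower ((PySem.Dict.mk f).getD "name" ""))),
       d || fields.any (fun f => PySem.Str.isIn "verify" (PySem.Str.lower ((PySem.Dict.mk f).getD "name" "")))) := by
  induction fields generalizing a b c d with
  | nil => simp
  | cons f rest ih =>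
    simp only [List.foldl_cons, List.any_cons, pvFlagsStep]
    rw [ih]
    cases PySem.Str.isIn "password" (PySem.Str.lower ((PySem.Dict.mk f).getD "name" "")) <;>
      cases PySem.Str.isIn "confirm" (PySem.Str.lower ((PySem.Dict.mk f).getD "name" "")) <;>
        cases PySem.Str.isIn "email" (PySem.Str.lower ((PySem.Dict.mk f).getD "name" "")) <;>
          cases PySem.Str.isIn "verify" (PySem.Str.lower ((PySem.Dict.mk f).getD "name" "")) <;>
            simp

-- ===== VERDICT (by name: the statement is the Claim_ definition above) =====
theorem has_cross_field_dependencies_py_spec : Claim_equal_has_cross_field_dependencies_py := by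
  intro fields _
  unfold Spec_has_cross_field_dependencies_py
  unfold has_cross_field_dependencies_py has_cross_field_dependencies_py_alt
  rw [pv_flags_fold]
  simp only [List.any_cons, List.any_nil, pv_set_any, List.any_map, Function.comp_def,
    Bool.false_or, Bool.or_false]
  rw [Bool.or_assoc]
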